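-- pv_equiv track=rewrite | github.com/oleksandr-medviediev/campus_2018_python | Volodymyr_Kuksa/3/rock_paper_scissors.py | determine_losers
-- ===== SOURCE A (Python) =====
-- AVAILABLE_WEAPONS = ('rock', 'paper', 'scissors')
--
-- def determine_weakest_weapon_for_round(weapons_presence):
--     """
--     Return the name of the weakest weapon in the round.
--
--     :param weapons_presence: dict that determines if the weapon is present in current round.
--     :type weapons_presence: dict(weapon_name: bool).
--
--     :return: name of the weakest weapon in the round.
--     :rtype: str.
--     """
--     result = ''
--
--     if weapons_presence['rock'] and weapons_presence['paper'] and not weapons_presence['scissors']: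
--         result = 'rock'
--     elif weapons_presence['rock'] and not weapons_presence['paper'] and weapons_presence['scissors']:
--         result = 'scissors'
--     elif not weapons_presence['rock'] and weapons_presence['paper'] and weapons_presence['scissors']:
--         result = 'paper'
--
--     return result
--
-- def determine_losers(weapons_for_round):
--     """
--     Return list of players hwo lost in the current round.
--
--     :param weapons_for_round: dict that represents the choice of weapon by each player.
--     :type weapons_for_round: dict(player_name: weapon_name).
--
--     :return: list of players who lost in the current round.
--     :rtype: list.
--     """
--     losers = []
--
--     weapons_selected = list(weapons_for_round.values())
--
--     weapons_presence = {weapon: bool(weapons_selected.count(weapon)) for weapon in AVAILABLE_WEAPONS}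
--
--     weakest_weapon = determine_weakest_weapon_for_round(weapons_presence)
--
--     for player in weapons_for_round.keys():
--
--         if weapons_for_round[player] == weakest_weapon:
--             losers.append(player)
--
--     return losers
-- ===== SOURCE B (Python) =====
-- AVAILABLE_WEAPONS = ('rock', 'paper', 'scissors')
--
--
-- def determine_losers(weapons_for_round):
--     groups = {}
--     for player, weapon in weapons_for_round.items():
--         groups.setdefault(weapon, []).append(player)
--     present = [i for i, w in enumerate(AVAILABLE_WEAPONS) if w in groups]
--     if len(present) == 2:
--         weakest = AVAILABLE_WEAPONS[(2 * sum(present) + 1) % 3]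
--     else:
--         weakest = ''
--     return groups.get(weakest, [])
-- ===== Notes on version B (the rewrite author's own statement) =====
-- stated objective: alternative
-- what changed: B builds a weapon-to-players grouping dict in one pass (setdefault/append), selects the weakest weapon by an arithmetic formula over the indices of present canonical weapons ((2*sum+1)%3 when exactly two are present), and returns the weakest weapon's bucket directly, replacing A's count-based presence dict, three-branch helper and second filtering pass over the players.
import Mathlib
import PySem

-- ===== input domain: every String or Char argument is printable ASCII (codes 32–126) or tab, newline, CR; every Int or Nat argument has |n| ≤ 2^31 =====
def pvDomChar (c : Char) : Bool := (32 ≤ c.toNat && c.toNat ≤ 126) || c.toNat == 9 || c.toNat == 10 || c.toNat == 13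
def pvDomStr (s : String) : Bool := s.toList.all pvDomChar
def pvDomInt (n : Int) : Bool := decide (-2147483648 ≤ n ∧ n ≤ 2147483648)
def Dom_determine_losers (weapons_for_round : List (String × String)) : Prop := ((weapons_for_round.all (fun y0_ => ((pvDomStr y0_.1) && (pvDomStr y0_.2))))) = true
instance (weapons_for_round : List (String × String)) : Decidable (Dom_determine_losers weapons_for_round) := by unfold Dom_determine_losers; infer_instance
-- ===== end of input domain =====

-- B groups players by weapon in one pass (setdefault/append), picks the weakest weapon by an
-- index-arithmetic formula over which canonical weapons have a bucket, and returns that bucket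
-- directly — no presence dict, no three-branch helper, no second pass over the players
-- (objective: alternative; same return value; no observable mutation).


-- ===== PORT A =====
def pvAvailableWeapons : List String := ["rock", "paper", "scissors"]

-- weapons_presence['rock'] etc.: the dict always carries all three keys at the call site,
-- so `getD _ false` is exact (the lookup never raises).
def determine_weakest_weapon_for_round (weapons_presence : PySem.Dict String Bool) : String :=
  if weapons_presence.getD "rock" false && weapons_presence.getD "paper" false
      && !(weapons_presence.getD "scissors" false) then "rock"
  else if weapons_presence.getD "rock" false && !(weapons_presence.getD "paper" false)
      && weapons_presence.getD "scissors" false then "scissors"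
  else if !(weapons_presence.getD "rock" false) && weapons_presence.getD "paper" false
      && weapons_presence.getD "scissors" false then "paper"
  else ""

def determine_losers (weapons_for_round : List (String × String)) : List String :=
  let d := PySem.Dict.ofList weapons_for_round
  let weapons_selected := d.values
  let weapons_presence := pvAvailableWeapons.foldl
    (fun acc w => acc.insert w (weapons_selected.count w != 0)) PySem.Dict.empty
  let weakest_weapon := determine_weakest_weapon_for_round weapons_presence
  -- weapons_for_round[player] with player drawn from the keys: `getD _ ""` is exact
  d.keys.foldl (fun losers player =>
    if d.getD player "" == weakest_weapon then losers ++ [player] else losers) []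

-- ===== PORT B =====
def determine_losers_alt (weapons_for_round : List (String × String)) : List String :=
  let d := PySem.Dict.ofList weapons_for_round
  -- groups.setdefault(weapon, []).append(player)  =  modify weapon [] (· ++ [player])
  let groups := d.items.foldl (fun g p => g.modify p.2 [] (· ++ [p.1])) PySem.Dict.empty
  let present := ((PySem.List.enumerate pvAvailableWeapons).filter
    (fun p => groups.contains p.2)).map (·.1)
  let weakest := if present.length == 2 then
      -- AVAILABLE_WEAPONS[(2*sum+1) % 3]: the index is always in 0..2, pyGetD _ "" is exact
      PySem.List.pyGetD pvAvailableWeapons (PySem.Int.mod (2 * present.sum + 1) 3) ""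
    else ""
  groups.getD weakest []

-- ===== PRECONDITION & SPEC =====
def Spec_determine_losers (weapons_for_round : List (String × String)) (out : List String) : Prop := out = determine_losers_alt weapons_for_round
instance (weapons_for_round : List (String × String)) (out : List String) : Decidable (Spec_determine_losers weapons_for_round out) := by unfold Spec_determine_losers; infer_instance

-- ===== CLAIM (what is proved, stated in full; the proofs are below) =====
def Claim_equal_determine_losers : Prop := ∀ (weapons_for_round : List (String × String)), Dom_determine_losers weapons_for_round → Spec_determine_losers weapons_for_round (determine_losers weapons_for_round)

-- ===== LEMMAS AND PROOFS =====

-- B's grouping fold, read back at a key, is A's player filter for that weapon.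
theorem pv_groups_getD (l : List (String × String)) (c : String) :
    (l.foldl (fun g p => g.modify p.2 [] (· ++ [p.1])) PySem.Dict.empty).getD c []
    = (l.filter (fun p => p.2 == c)).map (·.1) := by
  have h := PySem.Dict.getD_foldl_modify_append (l := l.map (fun p => (p.2, p.1)))
    (d := (PySem.Dict.empty : PySem.Dict String (List String))) (c := c)
  rw [List.foldl_map] at h
  simpa [List.filter_map, List.map_map, Function.comp] using h

-- B's bucket-existence test agrees with membership in the value list.
theorem pv_groups_contains (l : List (String × String)) (w : String) :
    (l.foldl (fun g p => g.modify p.2 [] (· ++ [p.1])) PySem.Dict.empty).contains w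
    = (l.map (·.2)).contains w := by
  have h := PySem.Dict.keys_foldl_modify_key (l := l) (key := fun p => p.2)
    (d0 := ([] : List String)) (f := fun g p => (· ++ [p.1]))
    (d := (PySem.Dict.empty : PySem.Dict String (List String)))
  have hk : (l.foldl (fun g p => g.modify p.2 [] (· ++ [p.1]))
      (PySem.Dict.empty : PySem.Dict String (List String))).keys
      = PySem.Set.ofList (l.map (·.2)) := by
    rw [h]; simp [PySem.Dict.keys_empty, PySem.Set.update_nil_left]
  have hiff : ((l.foldl (fun g p => g.modify p.2 [] (· ++ [p.1]))
      (PySem.Dict.empty : PySem.Dict String (List String))).contains w = true)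
      ↔ w ∈ l.map (·.2) := by
    rw [PySem.Dict.contains_iff_mem_keys, hk]; simp [PySem.Set.mem_ofList]
  by_cases hm : w ∈ l.map (·.2)
  · simp [hiff.mpr hm, hm]
  · simp [hm] at hiff ⊢
    exact hiff

theorem pv_count_ne_zero_eq_contains (vals : List String) (w : String) :
    (vals.count w != 0) = vals.contains w := by
  by_cases h : w ∈ vals <;> simp [h, List.count_eq_zero]

-- A's three-branch weakest weapon equals B's enumerate/sum/mod formula, by cases on the
-- three presence booleans.
theorem pv_weakest_eq (vals : List String) :
    determine_weakest_weapon_for_round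
      (pvAvailableWeapons.foldl (fun acc w => acc.insert w (vals.count w != 0)) PySem.Dict.empty)
    = (let present := ((PySem.List.enumerate pvAvailableWeapons).filter
        (fun p => vals.contains p.2)).map (·.1)
      if present.length == 2 then
        PySem.List.pyGetD pvAvailableWeapons (PySem.Int.mod (2 * present.sum + 1) 3) ""
      else "") := by
  simp only [pvAvailableWeapons, List.foldl, pv_count_ne_zero_eq_contains,
    PySem.List.enumerate, List.filter]
  generalize vals.contains "rock" = r
  generalize vals.contains "paper" = p
  generalize vals.contains "scissors" = s
  cases r <;> cases p <;> cases s <;> rfl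

-- A's player loop over the keys is the item filter for the weakest weapon.
theorem pv_loop_eq (d : PySem.Dict String String) (hnd : d.keys.Nodup) (wk : String) :
    d.keys.foldl (fun losers player =>
        if d.getD player "" == wk then losers ++ [player] else losers) []
    = (d.items.filter (fun p => p.2 == wk)).map (·.1) := by
  rw [PySem.List.foldl_append_if_eq_filter, List.nil_append]
  simp only [PySem.Dict.keys]
  rw [List.filter_map]
  congr 1
  apply List.filter_congr
  intro a ha
  have := PySem.Dict.getD_of_mem_items (d := d) (k := a.1) (v := a.2) (by simpa using ha) hnd (d0 := "")
  simp [Function.comp, this]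

-- ===== VERDICT (by name: the statement is the Claim_ definition above) =====
theorem determine_losers_spec : Claim_equal_determine_losers := by
  intro l _
  unfold Spec_determine_losers determine_losers determine_losers_alt
  dsimp only
  rw [pv_weakest_eq]
  have hv : (PySem.Dict.ofList l).values = (PySem.Dict.ofList l).items.map (·.2) := rfl
  simp only [pv_groups_contains, pv_groups_getD, hv]
  rw [pv_loop_eq _ (PySem.Dict.nodup_keys_ofList l)]
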